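-- pv_equiv track=rewrite | github.com/ituieee/ieee-itu-python | 3. Hafta/Ödev Çözümleri/hard.py | yer_bul
-- ===== SOURCE A (Python) =====
-- def yer_bul(otopark):
--     uzaklık = -1 # -1 Yapılma sebebi, matrisin ilk elemanının i + j toplamının 0 olması
--     cords = None # None olarak yaratıldı, eğer bu değer değiştirilmezse boş yer kalmadığı anlamına geliyor
--     for i in range(len(otopark)):
--         for j in range(len(otopark)):
--             if(otopark[i][j] == 1): # Eğer o kordinat doluysa
--                 continue
--             if ((i + j) > uzaklık): # Eğer o ana kadar bulunandan daha uzak bir kordinat bulunduysa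
--                 uzaklık = i + j # Max uzaklık, tekrar kıyaslama için saklanır
--                 cords = (i, j) # Max uzaklığa ait kordinatlar saklanır
--     return cords
-- ===== SOURCE B (Python) =====
-- def yer_bul(otopark):
--     n = len(otopark)
--     for s in range(2 * (n - 1), -1, -1):
--         for i in range(max(0, s - (n - 1)), min(s, n - 1) + 1):
--             if otopark[i][s - i] != 1:
--                 return (i, s - i)
--     return None
-- ===== Notes on version B (the rewrite author's own statement) =====
-- stated objective: alternative
-- what changed: B walks anti-diagonals from the farthest sum downward (i ascending within a diagonal) and returns the first empty cell immediately, instead of A's full row-major scan that tracks a running maximum of i+j.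
import Mathlib
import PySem

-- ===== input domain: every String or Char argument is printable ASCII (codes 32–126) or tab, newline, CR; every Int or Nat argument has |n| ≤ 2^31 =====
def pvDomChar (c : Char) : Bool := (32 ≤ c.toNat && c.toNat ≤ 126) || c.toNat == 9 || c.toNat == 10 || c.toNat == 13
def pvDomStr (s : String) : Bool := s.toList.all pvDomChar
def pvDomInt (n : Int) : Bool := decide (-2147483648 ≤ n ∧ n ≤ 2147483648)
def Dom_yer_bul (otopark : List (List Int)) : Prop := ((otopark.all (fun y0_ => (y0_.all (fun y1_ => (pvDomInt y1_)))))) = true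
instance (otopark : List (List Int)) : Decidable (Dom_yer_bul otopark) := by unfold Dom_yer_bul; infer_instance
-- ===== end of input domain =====

-- B replaces A's full row-major scan (running maximum of i+j) by an anti-diagonal walk
-- from the farthest diagonal downward with an early return; same result, different traversal.

-- ===== PORT A =====
def yer_bul (otopark : List (List Int)) : Option (Int × Int) :=
  (((PySem.List.pyRange 0 (otopark.length : Int) 1).foldl
    (fun st i =>
      (PySem.List.pyRange 0 (otopark.length : Int) 1).foldl
        (fun st j =>
          if PySem.List.pyGetD (PySem.List.pyGetD otopark i []) j 0 == 1 then st
          else if i + j > st.1 then (i + j, some (i, j)) else st)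
        st)
    ((-1 : Int), (none : Option (Int × Int))))).2

-- ===== PORT B =====
def yer_bul_alt (otopark : List (List Int)) : Option (Int × Int) :=
  (PySem.List.pyRange (2 * ((otopark.length : Int) - 1)) (-1) (-1)).findSome? (fun s =>
    (PySem.List.pyRange (max 0 (s - ((otopark.length : Int) - 1)))
        (min s ((otopark.length : Int) - 1) + 1) 1).findSome? (fun i =>
      if PySem.List.pyGetD (PySem.List.pyGetD otopark i []) (s - i) 0 != 1
      then some (i, s - i) else none))

-- ===== PRECONDITION & SPEC =====
-- Pre_ excludes exactly the ragged inputs on which Python A raises IndexError: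
-- A indexes otopark[i][j] for all i, j < len(otopark), so every row must have length ≥ len(otopark).
def Pre_yer_bul (otopark : List (List Int)) : Prop :=
  ∀ row ∈ otopark, otopark.length ≤ row.length
instance (otopark : List (List Int)) : Decidable (Pre_yer_bul otopark) := by
  unfold Pre_yer_bul; infer_instance
def pvWitness_yer_bul : List (List Int) := [[1, 0], [0, 1]]
def Spec_yer_bul (otopark : List (List Int)) (out : Option (Int × Int)) : Prop := out = yer_bul_alt otopark
instance (otopark : List (List Int)) (out : Option (Int × Int)) : Decidable (Spec_yer_bul otopark out) := by unfold Spec_yer_bul; infer_instance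

-- ===== CLAIM (what is proved, stated in full; the proofs are below) =====
def Claim_equal_yer_bul : Prop := ∀ (otopark : List (List Int)), Dom_yer_bul otopark → Pre_yer_bul otopark → Spec_yer_bul otopark (yer_bul otopark)

-- ===== LEMMAS AND PROOFS =====

-- the key i+j of a cell, the "cell is empty" test, A's fold step on empty cells
def gkey (p : Int × Int) : Int := p.1 + p.2
def gcell (grid : List (List Int)) (p : Int × Int) : Bool :=
  PySem.List.pyGetD (PySem.List.pyGetD grid p.1 []) p.2 0 != 1
def step' (st : Int × Option (Int × Int)) (p : Int × Int) : Int × Option (Int × Int) :=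
  if gkey p > st.1 then (gkey p, some p) else st
-- the square's cells in row-major order and in anti-diagonal order
def RM (grid : List (List Int)) : List (Int × Int) :=
  (PySem.List.pyRange 0 (grid.length : Int) 1).flatMap (fun i =>
    (PySem.List.pyRange 0 (grid.length : Int) 1).map (fun j => (i, j)))
def Dg (grid : List (List Int)) : List (Int × Int) :=
  (PySem.List.pyRange (2 * ((grid.length : Int) - 1)) (-1) (-1)).flatMap (fun s =>
    (PySem.List.pyRange (max 0 (s - ((grid.length : Int) - 1))) (min s ((grid.length : Int) - 1) + 1) 1).map
      (fun i => (i, s - i)))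
def ordD (p q : Int × Int) : Prop := gkey q < gkey p ∨ (gkey p = gkey q ∧ p.1 < q.1)
def ordR (p q : Int × Int) : Prop := p.1 < q.1 ∨ (p.1 = q.1 ∧ p.2 < q.2)

lemma A_eq (grid : List (List Int)) :
    yer_bul grid = (((RM grid).filter (gcell grid)).foldl step' ((-1 : Int), (none : Option (Int × Int)))).2 := by
  unfold yer_bul RM
  rw [List.foldl_filter, List.foldl_flatMap]
  congr 1
  refine PySem.List.foldl_congr_mem _ _ _ _ ?_
  intro st i _
  rw [List.foldl_map]
  refine PySem.List.foldl_congr_mem _ _ _ _ ?_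
  intro st' j _
  by_cases h : PySem.List.pyGetD (PySem.List.pyGetD grid i []) j 0 = 1 <;>
    simp [gcell, step', gkey, h]

lemma findSome?_flatMap' {α β γ : Type} (l : List α) (f : α → List β) (g : β → Option γ) :
    (l.flatMap f).findSome? g = l.findSome? (fun a => (f a).findSome? g) := by
  induction l with
  | nil => simp
  | cons a t ih =>
    cases hfa : (f a).findSome? g <;>
      simp [List.flatMap_cons, List.findSome?_append, ih, hfa]

lemma findSome?_guard_eq_head?_filter {α : Type} (c : α → Bool) (l : List α) :
    l.findSome? (fun p => if c p then some p else none) = (l.filter c).head? := by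
  induction l with
  | nil => simp
  | cons a t ih => by_cases h : c a <;> simp [h, ih]

lemma findSome?_some' {α : Type} (l : List α) : l.findSome? some = l.head? := by
  induction l <;> simp_all

lemma B_eq (grid : List (List Int)) :
    yer_bul_alt grid = ((Dg grid).filter (gcell grid)).head? := by
  unfold yer_bul_alt Dg
  rw [List.filter_flatMap, ← findSome?_some', findSome?_flatMap']
  refine congrArg (fun f => List.findSome? f _) (funext fun s => ?_)
  rw [findSome?_some', ← findSome?_guard_eq_head?_filter (gcell grid), List.findSome?_map]
  rfl

lemma mem_RM {grid : List (List Int)} {p : Int × Int} :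
    p ∈ RM grid ↔ 0 ≤ p.1 ∧ p.1 < (grid.length : Int) ∧ 0 ≤ p.2 ∧ p.2 < (grid.length : Int) := by
  unfold RM
  simp only [List.mem_flatMap, List.mem_map, PySem.List.mem_pyRange_one]
  constructor
  · rintro ⟨i, ⟨hi1, hi2⟩, j, ⟨hj1, hj2⟩, rfl⟩
    exact ⟨hi1, hi2, hj1, hj2⟩
  · rintro ⟨h1, h2, h3, h4⟩
    exact ⟨p.1, ⟨h1, h2⟩, p.2, ⟨h3, h4⟩, rfl⟩

lemma mem_Dg {grid : List (List Int)} {p : Int × Int} :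
    p ∈ Dg grid ↔ 0 ≤ p.1 ∧ p.1 < (grid.length : Int) ∧ 0 ≤ p.2 ∧ p.2 < (grid.length : Int) := by
  unfold Dg
  simp only [List.mem_flatMap, List.mem_map, PySem.List.mem_pyRange_one,
    PySem.List.mem_pyRange_neg_one]
  constructor
  · rintro ⟨s, ⟨hs1, hs2⟩, i, ⟨hi1, hi2⟩, rfl⟩
    refine ⟨?_, ?_, ?_, ?_⟩ <;> dsimp only <;> omega
  · rintro ⟨h1, h2, h3, h4⟩
    refine ⟨p.1 + p.2, ⟨by omega, by omega⟩, p.1, ⟨by omega, by omega⟩, ?_⟩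
    have : p.1 + p.2 - p.1 = p.2 := by ring
    rw [this]

lemma pairwise_Dg (grid : List (List Int)) : (Dg grid).Pairwise ordD := by
  unfold Dg
  rw [List.pairwise_flatMap]
  constructor
  · intro s _
    rw [List.pairwise_map]
    refine (PySem.List.pairwise_lt_pyRange_one _ _).imp ?_
    intro a b h
    right
    exact ⟨by dsimp only [gkey]; ring, h⟩
  · rw [PySem.List.pyRange_neg_one_eq_reverse, List.pairwise_reverse]
    refine (PySem.List.pairwise_lt_pyRange_one _ _).imp ?_
    intro a b hab x hx y hy
    simp only [List.mem_map] at hx hy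
    obtain ⟨i, _, rfl⟩ := hx
    obtain ⟨i', _, rfl⟩ := hy
    left
    dsimp only [gkey]
    omega

lemma pairwise_RM (grid : List (List Int)) : (RM grid).Pairwise ordR := by
  unfold RM
  rw [List.pairwise_flatMap]
  constructor
  · intro i _
    rw [List.pairwise_map]
    refine (PySem.List.pairwise_lt_pyRange_one _ _).imp ?_
    intro a b h
    exact Or.inr ⟨rfl, h⟩
  · refine (PySem.List.pairwise_lt_pyRange_one _ _).imp ?_
    intro a b hab x hx y hy
    simp only [List.mem_map] at hx hy
    obtain ⟨j, _, rfl⟩ := hx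
    obtain ⟨j', _, rfl⟩ := hy
    exact Or.inl hab

lemma nodup_RM (grid : List (List Int)) : (RM grid).Nodup := by
  refine (pairwise_RM grid).imp ?_
  intro a b h
  rcases h with h | ⟨h1, h2⟩ <;> intro hab <;> subst hab <;> omega

lemma nodup_Dg (grid : List (List Int)) : (Dg grid).Nodup := by
  refine (pairwise_Dg grid).imp ?_
  intro a b h hab
  subst hab
  rcases h with h | ⟨h1, h2⟩
  · exact absurd h (lt_irrefl _)
  · omega

lemma perm_RM_Dg (grid : List (List Int)) : (RM grid).Perm (Dg grid) := by
  refine (List.perm_ext_iff_of_nodup (nodup_RM grid) (nodup_Dg grid)).mpr ?_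
  intro p; rw [mem_RM, mem_Dg]

lemma fold_fst_lt {B : Int} {E : List (Int × Int)} (hE : ∀ p ∈ E, gkey p < B) :
    ∀ d c, d < B → ((E.foldl step' (d, c)).1 < B) := by
  induction E with
  | nil => intro d c hd; simpa using hd
  | cons p t ih =>
    intro d c hd
    have hp : gkey p < B := hE p (by simp)
    have ht : ∀ q ∈ t, gkey q < B := fun q hq => hE q (by simp [hq])
    simp only [List.foldl_cons, step']
    by_cases h : gkey p > d
    · simpa [h] using ih ht (gkey p) (some p) hp
    · simpa [h] using ih ht d c hd

lemma fold_saturated {E : List (Int × Int)} {d : Int} {c : Option (Int × Int)}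
    (hE : ∀ p ∈ E, gkey p ≤ d) : E.foldl step' (d, c) = (d, c) := by
  induction E with
  | nil => rfl
  | cons p t ih =>
    have hp : ¬ gkey p > d := by have := hE p (by simp); omega
    simp only [List.foldl_cons, step', hp, if_false]
    exact ih (fun q hq => hE q (by simp [hq]))

lemma fold_eq_head {E D : List (Int × Int)} (hperm : E.Perm D) (hD : D.Pairwise ordD)
    (hE : E.Pairwise (fun p q => gkey p = gkey q → p.1 < q.1)) (hnd : E.Nodup)
    (hpos : ∀ p ∈ E, (-1 : Int) < gkey p) :
    ((E.foldl step' ((-1 : Int), (none : Option (Int × Int)))).2) = D.head? := by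
  cases D with
  | nil =>
    have : E = [] := hperm.eq_nil
    subst this; rfl
  | cons m D' =>
    have hm : m ∈ E := hperm.mem_iff.mpr (by simp)
    have hDm : ∀ q ∈ D', ordD m q := (List.pairwise_cons.mp hD).1
    have hmax : ∀ q ∈ E, gkey q ≤ gkey m ∧ (gkey q = gkey m → q = m ∨ m.1 < q.1) := by
      intro q hq
      have : q ∈ m :: D' := hperm.mem_iff.mp hq
      rcases List.mem_cons.mp this with rfl | hq'
      · exact ⟨le_refl _, fun _ => Or.inl rfl⟩
      · rcases hDm q hq' with h | ⟨h1, h2⟩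
        · constructor
          · omega
          · intro he; omega
        · exact ⟨le_of_eq h1.symm, fun _ => Or.inr h2⟩
    obtain ⟨E1, E2, rfl⟩ := List.append_of_mem hm
    have hnotm : m ∉ E1 := by
      intro hmem
      exact List.disjoint_of_nodup_append hnd hmem (by simp)
    have hcross : ∀ q ∈ E1, (gkey q = gkey m → q.1 < m.1) := by
      have := (List.pairwise_append.mp hE).2.2
      intro q hq hk
      exact this q hq m (by simp) hk
    have hE1lt : ∀ q ∈ E1, gkey q < gkey m := by
      intro q hq
      have h1 := (hmax q (by simp [hq])).1
      rcases lt_or_eq_of_le h1 with h | h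
      · exact h
      · rcases (hmax q (by simp [hq])).2 h with rfl | h2
        · exact absurd hq hnotm
        · have := hcross q hq h; omega
    rw [List.foldl_append]
    have h1 : ((E1.foldl step' ((-1 : Int), (none : Option (Int × Int))))).1 < gkey m :=
      fold_fst_lt hE1lt (-1) none (hpos m hm)
    rw [List.foldl_cons]
    have hstep : step' (E1.foldl step' ((-1 : Int), (none : Option (Int × Int)))) m
        = (gkey m, some m) := by
      simp [step', h1]
    rw [hstep]
    have hE2 : ∀ q ∈ E2, gkey q ≤ gkey m := by
      intro q hq; exact (hmax q (by simp [hq])).1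
    rw [fold_saturated hE2]
    rfl

lemma pos_key {grid : List (List Int)} {p : Int × Int}
    (hp : p ∈ (RM grid).filter (gcell grid)) : (-1 : Int) < gkey p := by
  have := mem_RM.mp (List.mem_of_mem_filter hp)
  unfold gkey; omega

-- ===== VERDICT (by name: the statement is the Claim_ definition above) =====
theorem yer_bul_spec : Claim_equal_yer_bul := by
  intro grid _ _
  unfold Spec_yer_bul
  rw [A_eq, B_eq]
  refine fold_eq_head ((perm_RM_Dg grid).filter _) ((pairwise_Dg grid).filter _) ?_ ((nodup_RM grid).filter _) (fun p hp => pos_key hp)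
  refine ((pairwise_RM grid).filter _).imp ?_
  intro a b h hk
  rcases h with h | ⟨h1, h2⟩
  · exact h
  · exfalso; unfold gkey at hk; omega
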